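-- pv_equiv track=rewrite | github.com/HaadiRazaTDK/Student360 | services/helpers.py | get_prereq_chain
-- ===== SOURCE A (Python) =====
-- def get_prereq_chain(course, prereq_dict, credit_hours_dict, min_credit_hours=0, chain=None):
--     if chain is None:
--         chain = []
--     if course not in prereq_dict or not prereq_dict[course]:
--         return chain
--
--     # Only consider courses that have more credit hours than the minimum required
--     if credit_hours_dict.get(course, 0) >= min_credit_hours:
--         for prereq in prereq_dict[course]:
--             if prereq not in chain:  # Avoid circular dependencies
--                 chain.append(prereq)
--                 get_prereq_chain(prereq, prereq_dict, credit_hours_dict, min_credit_hours, chain)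
--     return chain
-- ===== SOURCE B (Python) =====
-- def get_prereq_chain(course, prereq_dict, credit_hours_dict, min_credit_hours=0, chain=None):
--     if chain is None:
--         chain = []
--     if course not in prereq_dict or not prereq_dict[course]:
--         return chain
--     stack = []
--     if credit_hours_dict.get(course, 0) >= min_credit_hours:
--         stack.append(list(prereq_dict[course]))
--     while stack:
--         frame = stack[-1]
--         if not frame:
--             stack.pop()
--             continue
--         p = frame.pop(0)
--         if p in chain:
--             continue
--         chain.append(p)
--         if p in prereq_dict and prereq_dict[p] and credit_hours_dict.get(p, 0) >= min_credit_hours: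
--             stack.append(list(prereq_dict[p]))
--     return chain
-- ===== Notes on version B (the rewrite author's own statement) =====
-- stated objective: alternative
-- what changed: Replaces the recursive DFS with an iterative while-loop over an explicit stack of pending prerequisite frames (no recursion; frames are pushed exactly when the child would have recursed).
import Mathlib
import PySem

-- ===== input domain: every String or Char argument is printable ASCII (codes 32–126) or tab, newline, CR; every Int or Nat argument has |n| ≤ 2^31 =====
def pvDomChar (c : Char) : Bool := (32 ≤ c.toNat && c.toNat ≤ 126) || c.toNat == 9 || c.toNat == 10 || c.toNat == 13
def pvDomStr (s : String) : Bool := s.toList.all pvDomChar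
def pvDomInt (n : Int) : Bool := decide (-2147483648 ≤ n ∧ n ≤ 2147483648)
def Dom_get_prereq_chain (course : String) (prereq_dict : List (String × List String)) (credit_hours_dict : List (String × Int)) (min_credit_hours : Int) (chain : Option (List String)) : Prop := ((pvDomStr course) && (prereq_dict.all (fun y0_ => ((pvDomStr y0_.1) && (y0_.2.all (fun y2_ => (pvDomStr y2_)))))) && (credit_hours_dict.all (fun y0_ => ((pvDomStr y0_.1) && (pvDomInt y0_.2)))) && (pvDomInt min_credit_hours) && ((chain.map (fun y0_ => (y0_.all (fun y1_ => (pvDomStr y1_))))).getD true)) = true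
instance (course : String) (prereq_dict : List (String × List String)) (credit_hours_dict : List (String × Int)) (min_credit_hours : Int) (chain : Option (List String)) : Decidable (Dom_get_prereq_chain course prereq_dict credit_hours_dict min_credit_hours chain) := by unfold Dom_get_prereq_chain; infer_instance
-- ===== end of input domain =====

-- B replaces A's recursive DFS by an iterative while-loop over an explicit stack of pending
-- prerequisite frames (same return value; both Pythons append to the caller's `chain` in place,
-- and the equivalence proved here is about the RETURN value).
-- ===== PORT A =====
-- A: recursive DFS (Python mutates `chain` in place; the equivalence proved here is about the
-- RETURN value, which in Python is the same mutated list). The recursion is ported with a fuel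
-- guard (`0 => chain`) that only makes it total: the wrapper passes a provably sufficient fuel
-- (one more than the number of distinct keys/values, since every nested call first appends a
-- fresh such string to `chain`).
mutual
def pvA_go (pd : List (String × List String)) (cd : List (String × Int)) (mch : Int) :
    Nat → String → List String → List String
  | 0, _, chain => chain
  | fuel + 1, course, chain =>
    match (PySem.Dict.mk pd).get? course with
    | none => chain
    | some [] => chain
    | some (q :: qs) =>
      if (PySem.Dict.mk cd).getD course 0 ≥ mch then
        pvA_loop pd cd mch fuel (q :: qs) chain
      else chain
  termination_by fuel _ _ => (fuel, 0)

def pvA_loop (pd : List (String × List String)) (cd : List (String × Int)) (mch : Int) :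
    Nat → List String → List String → List String
  | _, [], chain => chain
  | fuel, p :: ps, chain =>
    if p ∈ chain then pvA_loop pd cd mch fuel ps chain
    else pvA_loop pd cd mch fuel ps (pvA_go pd cd mch fuel p (chain ++ [p]))
  termination_by fuel ps _ => (fuel, ps.length + 1)
end

def get_prereq_chain (course : String) (prereq_dict : List (String × List String)) (credit_hours_dict : List (String × Int)) (min_credit_hours : Int) (chain : Option (List String)) : List String :=
  let chain0 := chain.getD []
  pvA_go prereq_dict credit_hours_dict min_credit_hours
    ((prereq_dict.map Prod.fst ++ prereq_dict.flatMap Prod.snd).dedup.length + 2) course chain0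

-- ===== PORT B =====
-- B: iterative DFS over an explicit stack of pending prerequisite frames (no recursion).
-- pvU / pvN / pvW only measure termination of the while loop; they play no computational role.
def pvU (pd : List (String × List String)) : List String :=
  (pd.map Prod.fst ++ pd.flatMap Prod.snd).dedup

def pvN (pd : List (String × List String)) (chain : List String) : Nat :=
  ((pvU pd).filter (fun s => !decide (s ∈ chain))).length

def pvW (stk : List (List String)) : Nat := (stk.map List.length).sum + stk.length

theorem pvN_mono_of_subset (pd : List (String × List String)) (c₁ c₂ : List String)
    (h : ∀ x ∈ c₁, x ∈ c₂) : pvN pd c₂ ≤ pvN pd c₁ := by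
  exact (List.monotone_filter_right _ (by
    intro a ha
    simp only [Bool.not_eq_eq_eq_not, Bool.not_true, decide_eq_false_iff_not] at *
    exact fun hc => ha (h a hc))).length_le

theorem pvFilter_append_lt (l chain : List String) (p : String)
    (hU : p ∈ l) (hc : p ∉ chain) :
    (l.filter (fun s => !decide (s ∈ chain ++ [p]))).length <
      (l.filter (fun s => !decide (s ∈ chain))).length := by
  have hmono : ∀ (m : List String),
      (m.filter (fun s => !decide (s ∈ chain ++ [p]))).length ≤
      (m.filter (fun s => !decide (s ∈ chain))).length := by
    intro m
    refine (List.monotone_filter_right _ ?_).length_le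
    intro x hx
    simp only [Bool.not_eq_eq_eq_not, Bool.not_true, decide_eq_false_iff_not,
      List.mem_append, List.mem_singleton] at *
    exact fun h => hx (Or.inl h)
  induction l with
  | nil => simp at hU
  | cons a l ih =>
    rcases List.mem_cons.mp hU with rfl | hmem
    · rw [List.filter_cons_of_neg (by simp), List.filter_cons_of_pos (by simp [hc])]
      exact Nat.lt_succ_of_le (hmono l)
    · have hih := ih hmem
      by_cases ha : a ∈ chain ++ [p]
      · rw [List.filter_cons_of_neg (by simp [ha])]
        by_cases ha2 : a ∈ chain
        · rw [List.filter_cons_of_neg (by simp [ha2])]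
          exact hih
        · rw [List.filter_cons_of_pos (by simp [ha2])]
          simp only [List.length_cons]
          omega
      · have ha2 : a ∉ chain := fun h => ha (List.mem_append_left _ h)
        rw [List.filter_cons_of_pos (by simp [ha]), List.filter_cons_of_pos (by simp [ha2])]
        simp only [List.length_cons]
        omega

theorem pvN_append_lt (pd : List (String × List String)) (chain : List String) (p : String)
    (hU : p ∈ pvU pd) (hc : p ∉ chain) : pvN pd (chain ++ [p]) < pvN pd chain :=
  pvFilter_append_lt (pvU pd) chain p hU hc

theorem pvGet_facts (pd : List (String × List String)) (p : String) (l : List String)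
    (h : (PySem.Dict.mk pd).get? p = some l) :
    p ∈ pvU pd ∧ l.length ≤ (pd.flatMap Prod.snd).length := by
  induction pd with
  | nil => exact absurd h (by simp [PySem.Dict.get?])
  | cons kv rest ih =>
    obtain ⟨k, v⟩ := kv
    rw [PySem.Dict.get?_mk_cons] at h
    by_cases hk : k = p
    · subst hk
      simp only [BEq.rfl, if_pos] at h
      obtain rfl : v = l := by simpa using h
      refine ⟨?_, ?_⟩
      · simp [pvU]
      · simp only [List.flatMap_cons, List.length_append]
        omega
    · rw [if_neg (by simpa using hk)] at h
      obtain ⟨h1, h2⟩ := ih h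
      refine ⟨?_, ?_⟩
      · simp only [pvU, List.mem_dedup, List.mem_append] at h1 ⊢
        rcases h1 with h1 | h1
        · exact Or.inl (by simp at h1 ⊢; tauto)
        · exact Or.inr (by simp at h1 ⊢; tauto)
      · simp only [List.flatMap_cons, List.length_append]
        omega

theorem pvU_of_key (pd : List (String × List String)) (p : String) (l : List String)
    (h : (PySem.Dict.mk pd).get? p = some l) : p ∈ pvU pd := (pvGet_facts pd p l h).1

def pvB_run (pd : List (String × List String)) (cd : List (String × Int)) (mch : Int) :
    List String → List (List String) → List String
  | chain, [] => chain
  | chain, [] :: stk => pvB_run pd cd mch chain stk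
  | chain, (p :: ps) :: stk =>
    if p ∈ chain then pvB_run pd cd mch chain (ps :: stk)
    else
      match h : (PySem.Dict.mk pd).get? p with
      | some (q :: qs) =>
        if (PySem.Dict.mk cd).getD p 0 ≥ mch then
          pvB_run pd cd mch (chain ++ [p]) ((q :: qs) :: ps :: stk)
        else
          pvB_run pd cd mch (chain ++ [p]) (ps :: stk)
      | some [] => pvB_run pd cd mch (chain ++ [p]) (ps :: stk)
      | none => pvB_run pd cd mch (chain ++ [p]) (ps :: stk)
  termination_by chain stk => pvN pd chain * ((pd.flatMap Prod.snd).length + 1) + pvW stk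
  decreasing_by
  · simp [pvW]
  · simp only [pvW, List.map_cons, List.sum_cons, List.length_cons]
    omega
  · -- push case
    have hpc : p ∉ chain := by assumption
    have hU := pvU_of_key pd p (q :: qs) h
    have hlt := pvN_append_lt pd chain p hU hpc
    have hlen := (pvGet_facts pd p (q :: qs) h).2
    simp only [pvW, List.map_cons, List.sum_cons, List.length_cons]
    simp only [List.length_cons] at hlen
    have hmul : (pvN pd (chain ++ [p]) + 1) * ((pd.flatMap Prod.snd).length + 1) ≤
        pvN pd chain * ((pd.flatMap Prod.snd).length + 1) :=
      Nat.mul_le_mul_right _ hlt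
    rw [Nat.add_mul, Nat.one_mul] at hmul
    omega
  · have hle : pvN pd (chain ++ [p]) ≤ pvN pd chain :=
      pvN_mono_of_subset pd chain (chain ++ [p]) (fun x hx => List.mem_append_left _ hx)
    simp only [pvW, List.map_cons, List.sum_cons, List.length_cons]
    have hmul : pvN pd (chain ++ [p]) * ((pd.flatMap Prod.snd).length + 1) ≤
        pvN pd chain * ((pd.flatMap Prod.snd).length + 1) := Nat.mul_le_mul_right _ hle
    omega
  · have hle : pvN pd (chain ++ [p]) ≤ pvN pd chain :=
      pvN_mono_of_subset pd chain (chain ++ [p]) (fun x hx => List.mem_append_left _ hx)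
    simp only [pvW, List.map_cons, List.sum_cons, List.length_cons]
    have hmul : pvN pd (chain ++ [p]) * ((pd.flatMap Prod.snd).length + 1) ≤
        pvN pd chain * ((pd.flatMap Prod.snd).length + 1) := Nat.mul_le_mul_right _ hle
    omega
  · have hle : pvN pd (chain ++ [p]) ≤ pvN pd chain :=
      pvN_mono_of_subset pd chain (chain ++ [p]) (fun x hx => List.mem_append_left _ hx)
    simp only [pvW, List.map_cons, List.sum_cons, List.length_cons]
    have hmul : pvN pd (chain ++ [p]) * ((pd.flatMap Prod.snd).length + 1) ≤
        pvN pd chain * ((pd.flatMap Prod.snd).length + 1) := Nat.mul_le_mul_right _ hle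
    omega

def get_prereq_chain_alt (course : String) (prereq_dict : List (String × List String)) (credit_hours_dict : List (String × Int)) (min_credit_hours : Int) (chain : Option (List String)) : List String :=
  let chain0 := chain.getD []
  match (PySem.Dict.mk prereq_dict).get? course with
  | none => chain0
  | some [] => chain0
  | some (q :: qs) =>
    let stack : List (List String) :=
      if (PySem.Dict.mk credit_hours_dict).getD course 0 ≥ min_credit_hours then [q :: qs] else []
    pvB_run prereq_dict credit_hours_dict min_credit_hours chain0 stack

-- ===== PRECONDITION & SPEC =====
def Spec_get_prereq_chain (course : String) (prereq_dict : List (String × List String)) (credit_hours_dict : List (String × Int)) (min_credit_hours : Int) (chain : Option (List String)) (out : List String) : Prop := out = get_prereq_chain_alt course prereq_dict credit_hours_dict min_credit_hours chain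
instance (course : String) (prereq_dict : List (String × List String)) (credit_hours_dict : List (String × Int)) (min_credit_hours : Int) (chain : Option (List String)) (out : List String) : Decidable (Spec_get_prereq_chain course prereq_dict credit_hours_dict min_credit_hours chain out) := by unfold Spec_get_prereq_chain; infer_instance

-- ===== CLAIM (what is proved, stated in full; the proofs are below) =====
def Claim_equal_get_prereq_chain : Prop := ∀ (course : String) (prereq_dict : List (String × List String)) (credit_hours_dict : List (String × Int)) (min_credit_hours : Int) (chain : Option (List String)), Dom_get_prereq_chain course prereq_dict credit_hours_dict min_credit_hours chain → Spec_get_prereq_chain course prereq_dict credit_hours_dict min_credit_hours chain (get_prereq_chain course prereq_dict credit_hours_dict min_credit_hours chain)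

-- ===== LEMMAS AND PROOFS =====

theorem pvA_loop_prefix_of (pd : List (String × List String)) (cd : List (String × Int))
    (mch : Int) (fuel : Nat)
    (hgo : ∀ course chain, chain <+: pvA_go pd cd mch fuel course chain) :
    ∀ ps chain, chain <+: pvA_loop pd cd mch fuel ps chain := by
  intro ps
  induction ps with
  | nil => intro chain; rw [pvA_loop]
  | cons p ps ih =>
    intro chain
    rw [pvA_loop]
    by_cases hp : p ∈ chain
    · rw [if_pos hp]; exact ih chain
    · rw [if_neg hp]
      exact (List.prefix_append chain [p]).trans ((hgo p (chain ++ [p])).trans (ih _))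

theorem pvA_prefix (pd : List (String × List String)) (cd : List (String × Int)) (mch : Int) :
    ∀ fuel : Nat,
      (∀ course chain, chain <+: pvA_go pd cd mch fuel course chain) ∧
      (∀ ps chain, chain <+: pvA_loop pd cd mch fuel ps chain) := by
  intro fuel
  induction fuel with
  | zero =>
    have hgo : ∀ course chain, chain <+: pvA_go pd cd mch 0 course chain := by
      intro course chain; rw [pvA_go]
    exact ⟨hgo, pvA_loop_prefix_of pd cd mch 0 hgo⟩
  | succ f ih =>
    have hgo : ∀ course chain, chain <+: pvA_go pd cd mch (f + 1) course chain := by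
      intro course chain
      rw [pvA_go]
      cases hg : (PySem.Dict.mk pd).get? course with
      | none => exact List.prefix_rfl
      | some l =>
        cases l with
        | nil => exact List.prefix_rfl
        | cons q qs =>
          dsimp only
          by_cases hgate : (PySem.Dict.mk cd).getD course 0 ≥ mch
          · rw [if_pos hgate]; exact ih.2 (q :: qs) chain
          · rw [if_neg hgate]
    exact ⟨hgo, pvA_loop_prefix_of pd cd mch (f + 1) hgo⟩

theorem pvKey (pd : List (String × List String)) (cd : List (String × Int)) (mch : Int) :
    ∀ (fuel : Nat) (ps chain : List String) (stk : List (List String)),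
      pvN pd chain < fuel →
      pvB_run pd cd mch chain (ps :: stk) =
        pvB_run pd cd mch (pvA_loop pd cd mch fuel ps chain) stk := by
  intro fuel
  induction fuel using Nat.strong_induction_on with
  | _ fuel IH =>
  intro ps
  induction ps with
  | nil =>
    intro chain stk _
    rw [pvA_loop, pvB_run]
  | cons p ps ih =>
    intro chain stk hN
    rw [pvA_loop]
    by_cases hp : p ∈ chain
    · rw [if_pos hp, pvB_run, if_pos hp]
      exact ih chain stk hN
    · rw [if_neg hp, pvB_run, if_neg hp]
      obtain ⟨f, rfl⟩ : ∃ f, fuel = f + 1 := ⟨fuel - 1, by omega⟩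
      have hmono : pvN pd (chain ++ [p]) ≤ pvN pd chain :=
        pvN_mono_of_subset pd chain (chain ++ [p]) (fun x hx => List.mem_append_left _ hx)
      cases hg : (PySem.Dict.mk pd).get? p with
      | none =>
        dsimp only
        have hgo : pvA_go pd cd mch (f + 1) p (chain ++ [p]) = chain ++ [p] := by
          rw [pvA_go, hg]
        rw [hgo]
        exact ih (chain ++ [p]) stk (by omega)
      | some l =>
        cases l with
        | nil =>
          dsimp only
          have hgo : pvA_go pd cd mch (f + 1) p (chain ++ [p]) = chain ++ [p] := by
            rw [pvA_go, hg]
          rw [hgo]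
          exact ih (chain ++ [p]) stk (by omega)
        | cons q qs =>
          dsimp only
          by_cases hgate : (PySem.Dict.mk cd).getD p 0 ≥ mch
          · rw [if_pos hgate]
            have hgo : pvA_go pd cd mch (f + 1) p (chain ++ [p]) =
                pvA_loop pd cd mch f (q :: qs) (chain ++ [p]) := by
              rw [pvA_go, hg]; dsimp only; rw [if_pos hgate]
            have hlt : pvN pd (chain ++ [p]) < pvN pd chain :=
              pvN_append_lt pd chain p (pvU_of_key pd p (q :: qs) hg) hp
            have hstep := IH f (by omega) (q :: qs) (chain ++ [p]) (ps :: stk) (by omega)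
            rw [hstep, ← hgo]
            have hpre : chain ++ [p] <+: pvA_go pd cd mch (f + 1) p (chain ++ [p]) :=
              (pvA_prefix pd cd mch (f + 1)).1 p (chain ++ [p])
            have hN2 : pvN pd (pvA_go pd cd mch (f + 1) p (chain ++ [p])) ≤
                pvN pd (chain ++ [p]) :=
              pvN_mono_of_subset pd _ _ (fun x hx => hpre.subset hx)
            exact ih (pvA_go pd cd mch (f + 1) p (chain ++ [p])) stk (by omega)
          · rw [if_neg hgate]
            have hgo : pvA_go pd cd mch (f + 1) p (chain ++ [p]) = chain ++ [p] := by
              rw [pvA_go, hg]; dsimp only; rw [if_neg hgate]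
            rw [hgo]
            exact ih (chain ++ [p]) stk (by omega)

theorem pv_final : ∀ (course : String) (prereq_dict : List (String × List String))
    (credit_hours_dict : List (String × Int)) (min_credit_hours : Int)
    (chain : Option (List String)),
    get_prereq_chain course prereq_dict credit_hours_dict min_credit_hours chain =
      get_prereq_chain_alt course prereq_dict credit_hours_dict min_credit_hours chain := by
  intro course pd cd mch chain
  unfold get_prereq_chain get_prereq_chain_alt
  have hK : (pd.map Prod.fst ++ pd.flatMap Prod.snd).dedup.length + 2 =
      ((pd.map Prod.fst ++ pd.flatMap Prod.snd).dedup.length + 1) + 1 := rfl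
  rw [hK, pvA_go]
  cases hg : (PySem.Dict.mk pd).get? course with
  | none => rfl
  | some l =>
    cases l with
    | nil => rfl
    | cons q qs =>
      dsimp only
      by_cases hgate : (PySem.Dict.mk cd).getD course 0 ≥ mch
      · rw [if_pos hgate, if_pos hgate]
        have hN : pvN pd (chain.getD []) <
            (pd.map Prod.fst ++ pd.flatMap Prod.snd).dedup.length + 1 :=
          Nat.lt_succ_of_le (List.length_filter_le _ _)
        rw [pvKey pd cd mch ((pd.map Prod.fst ++ pd.flatMap Prod.snd).dedup.length + 1)
          (q :: qs) (chain.getD []) [] hN, pvB_run]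
      · rw [if_neg hgate, if_neg hgate]
        rw [pvB_run]

-- ===== VERDICT (by name: the statement is the Claim_ definition above) =====
theorem get_prereq_chain_spec : Claim_equal_get_prereq_chain := by
  intro course prereq_dict credit_hours_dict min_credit_hours chain _
  unfold Spec_get_prereq_chain
  exact pv_final course prereq_dict credit_hours_dict min_credit_hours chain
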